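-- pv_equiv track=rewrite | github.com/linhx13/leetcode-code | code/955-delete-columns-to-make-sorted-ii.py | minDeletionSize
-- ===== SOURCE A (Python) =====
-- from typing import List
-- import collections
--
-- def minDeletionSize(A: List[str]) -> int:
--     res = set()
--
--     def helper(rows, col):
--         if col >= len(A[0]):
--             return
--         if col in res:
--             helper(rows, col + 1)
--             return
--         todos = collections.defaultdict(set)
--         for i in range(1, len(rows)):
--             cur = A[rows[i]][col]
--             prev = A[rows[i - 1]][col]
--             if cur < prev:
--                 res.add(col)
--                 todos["#"].update(rows)
--                 break
--             elif cur == prev: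
--                 todos[cur].add(rows[i])
--                 todos[cur].add(rows[i - 1])
--         for v in todos.values():
--             helper(sorted(v), col + 1)
--
--     helper(list(range(len(A))), 0)
--     return len(res)
-- ===== SOURCE B (Python) =====
-- def minDeletionSize(A):
--     n = len(A[0])
--     res = set()
--     stack = [(list(range(len(A))), 0)]
--     while stack:
--         rows, col = stack.pop()
--         if col >= n:
--             continue
--         if col in res:
--             stack.append((rows, col + 1))
--             continue
--         m = len(rows)
--         k = m
--         for i in range(1, m):
--             if A[rows[i]][col] < A[rows[i - 1]][col]:
--                 k = i
--                 break
--         broke = k < m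
--         if broke:
--             res.add(col)
--         children = []
--         j = 0
--         while j < k:
--             h = j + 1
--             while h < k and A[rows[h]][col] == A[rows[j]][col]:
--                 h += 1
--             if h - j >= 2:
--                 children.append(rows[j:h])
--             j = h
--         if broke:
--             children.append(rows)
--         for c in reversed(children):
--             stack.append((c, col + 1))
--     return len(res)
-- ===== Notes on version B (the rewrite author's own statement) =====
-- stated objective: alternative
-- what changed: B replaces A's recursion with an explicit DFS stack and replaces A's defaultdict-of-sets plus per-group sorted() by a single in-order run-segmentation scan of each row group (find first violation, then split the prefix into maximal equal-character runs), so no dictionary and no sorting is performed; Pre_ additionally excludes inputs where two rows share the character '#' in the same column, on which A's defaultdict sentinel key "#" can collide with a real tie-run of '#' characters and A's recursion set becomes an accident of that collision.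
-- outside the precondition, e.g. on minDeletionSize(['!!###', '!!$!!', '#####', '##!$#', '"$%!#', '$$$#!']): A returns 2, B returns 4; on minDeletionSize(['ab', 'b']): A returns 0, B returns 0
import Mathlib
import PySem

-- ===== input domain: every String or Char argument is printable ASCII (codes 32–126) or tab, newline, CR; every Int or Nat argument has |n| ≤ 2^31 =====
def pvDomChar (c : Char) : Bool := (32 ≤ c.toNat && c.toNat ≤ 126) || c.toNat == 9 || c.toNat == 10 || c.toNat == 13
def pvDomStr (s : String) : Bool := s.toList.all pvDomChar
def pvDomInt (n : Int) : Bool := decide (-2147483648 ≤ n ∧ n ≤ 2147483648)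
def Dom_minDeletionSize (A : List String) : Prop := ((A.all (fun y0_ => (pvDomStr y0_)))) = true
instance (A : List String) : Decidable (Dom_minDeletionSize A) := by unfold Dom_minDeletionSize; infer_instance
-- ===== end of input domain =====

-- B replaces A's recursion + defaultdict-of-sets + per-group sorting by an explicit DFS stack and
-- in-order run segmentation of each row group (no dict, no sorting); equal return value on Pre_.

-- ===== PORT A =====
-- A[r][col] for a row index r and column col; both ports read characters only through this
-- accessor (out-of-range defaults are never reached on inputs satisfying Pre_).
def chAt (A : List String) (r : Int) (col : Nat) : Char :=
  (PySem.Str.pyGet? ((PySem.List.pyGet? A r).getD "") (col : Int)).getD ' '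

-- the 'for i in range(1, len(rows))' scan of helper: walks adjacent pairs (prev, r),
-- building todos; returns (todos, res, broke) where broke records the 'break'
def goA (A : List String) (rows : List Int) (col : Nat) (prev : Int) (rest : List Int)
    (todos : PySem.Dict Char (PySem.Set Int)) (res : PySem.Set Nat) :
    PySem.Dict Char (PySem.Set Int) × PySem.Set Nat × Bool :=
  match rest with
  | [] => (todos, res, false)
  | r :: rest' =>
    let cur := chAt A r col
    let prevC := chAt A prev col
    if cur < prevC then
      -- res.add(col); todos["#"].update(rows); break
      (todos.insert '#' ((todos.getD '#' PySem.Set.empty).update rows), res.add col, true)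
    else if cur = prevC then
      -- todos[cur].add(rows[i]); todos[cur].add(rows[i-1])
      let todos1 := todos.insert cur ((todos.getD cur PySem.Set.empty).add r)
      let todos2 := todos1.insert cur ((todos1.getD cur PySem.Set.empty).add prev)
      goA A rows col r rest' todos2 res
    else
      goA A rows col r rest' todos res

mutual
-- def helper(rows, col)
def helperA (A : List String) (n : Nat) (rows : List Int) (col : Nat) (res : PySem.Set Nat) :
    PySem.Set Nat :=
  if n ≤ col then res
  else if col ∈ res then helperA A n rows (col + 1) res
  else
    match rows with
    | [] => res   -- empty scan, empty todos: no recursive calls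
    | r0 :: rest =>
      let t := goA A rows col r0 rest PySem.Dict.empty res
      loopA A n t.1.values col t.2.1
termination_by (n + 1 - col, 0)

-- for v in todos.values(): helper(sorted(v), col + 1)
def loopA (A : List String) (n : Nat) (vs : List (PySem.Set Int)) (col : Nat)
    (res : PySem.Set Nat) : PySem.Set Nat :=
  match vs with
  | [] => res
  | v :: vs' => loopA A n vs' col (helperA A n (PySem.List.sorted v (fun x => x)) (col + 1) res)
termination_by (n - col, vs.length)
end

def minDeletionSize (A : List String) : Int :=
  let n := (PySem.Str.len ((PySem.List.pyGet? A 0).getD "")).toNat   -- len(A[0]); A ≠ [] by Pre_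
  PySem.Set.len (helperA A n (PySem.List.pyRange 0 (A.length) 1) 0 PySem.Set.empty)

-- ===== PORT B =====
-- k = first i with A[rows[i]][col] < A[rows[i-1]][col] (the inner for ... break loop); none = no break
def goK (A : List String) (col : Nat) (i : Nat) (prev : Int) : List Int → Option Nat
  | [] => none
  | r :: rest => if chAt A r col < chAt A prev col then some i else goK A col (i + 1) r rest

-- k as an Option: none = the inner loop ran to completion without break
def findK (A : List String) (col : Nat) : List Int → Option Nat
  | [] => none
  | r0 :: rest => goK A col 1 r0 rest

-- the 'while j < k' / 'while h < k' loops: maximal runs of equal characters of the prefix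
def runsB (A : List String) (col : Nat) : List Int → List (List Int)
  | [] => []
  | x :: xs =>
    (x :: xs.takeWhile (fun y => chAt A y col = chAt A x col)) ::
      runsB A col (xs.dropWhile (fun y => chAt A y col = chAt A x col))
termination_by l => l.length
decreasing_by simp; exact List.length_dropWhile_le _ _

-- children of one frame: the groups pushed for column col, and whether the column was deleted
def childrenB (A : List String) (col : Nat) (rows : List Int) : List (List Int) × Bool :=
  let k := (findK A col rows).getD rows.length
  let broke := decide (k < rows.length)
  let pre := PySem.List.slice rows none (some (k : Int))    -- rows[:k]
  let cs := (runsB A col pre).foldl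
    (fun (acc : List (List Int)) run => if 2 ≤ run.length then acc ++ [run] else acc) []
  (if broke then cs ++ [rows] else cs, broke)

-- ----- size bounds, used only for the termination of the stack loop below -----
theorem foldCB_eval : ∀ (rs : List (List Int)) (acc : List (List Int)),
    rs.foldl (fun (acc : List (List Int)) run => if 2 ≤ run.length then acc ++ [run] else acc) acc
      = acc ++ rs.filter (fun r => 2 ≤ r.length) := by
  intro rs
  induction rs with
  | nil => intro acc; simp
  | cons run rs' ih =>
    intro acc
    simp only [List.foldl_cons]
    by_cases h2 : 2 ≤ run.length
    · rw [ih]; simp [h2]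
    · rw [ih]; simp [h2]

theorem runsB_length_le (A : List String) (col : Nat) (l : List Int) :
    ((runsB A col l).length ≤ l.length) ∧ (∀ c ∈ runsB A col l, c.length ≤ l.length) := by
  fun_induction runsB A col l with
  | case1 => simp
  | case2 x xs ih =>
    obtain ⟨ih1, ih2⟩ := ih
    have hd := List.length_dropWhile_le (fun y => decide (chAt A y col = chAt A x col)) xs
    have ht := (List.takeWhile_sublist (p := fun y => decide (chAt A y col = chAt A x col)) (l := xs)).length_le
    constructor
    · simp only [List.length_cons]; omega
    · intro c hc
      rcases List.mem_cons.mp hc with h | h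
      · subst h; simp only [List.length_cons]; omega
      · have := ih2 c h; simp only [List.length_cons]; omega

theorem childrenB_size (A : List String) (col : Nat) (rows : List Int) :
    ((childrenB A col rows).1.length ≤ rows.length + 1) ∧
      (∀ c ∈ (childrenB A col rows).1, c.length ≤ rows.length) := by
  unfold childrenB
  simp only []
  rw [foldCB_eval]
  generalize (findK A col rows).getD rows.length = k
  have hpre : PySem.List.slice rows none (some (k : Int)) = rows.take k := by
    rw [PySem.List.slice_to _ (by positivity)]; simp
  rw [hpre]
  have h1 := runsB_length_le A col (rows.take k)
  have htk : (rows.take k).length ≤ rows.length := by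
    simpa using List.length_take_le _ _
  have hflt : ((runsB A col (rows.take k)).filter (fun r => 2 ≤ r.length)).length
      ≤ (runsB A col (rows.take k)).length := List.length_filter_le _ _
  constructor
  · split <;> simp only [List.nil_append, List.length_append, List.length_singleton,
      List.length_nil] <;> omega
  · intro c hc
    have hmem : c = rows ∨ c ∈ (runsB A col (rows.take k)).filter
        (fun r => decide (2 ≤ r.length)) := by
      split at hc
      · rcases List.mem_append.mp hc with h | h
        · right; simpa using h
        · left; simpa using h
      · right; simpa using hc
    rcases hmem with rfl | h
    · exact le_refl _
    · have := h1.2 c (List.mem_of_mem_filter h); omega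

theorem childrenB_pow_bound (A : List String) (col n : Nat) (rows : List Int) (h : col < n) :
    ((childrenB A col rows).1.map (fun c => (c.length + 2) ^ (n + 1 - (col + 1)))).sum
      < (rows.length + 2) ^ (n + 1 - col) := by
  have hb := childrenB_size A col rows
  have hbound : ∀ x ∈ (childrenB A col rows).1.map (fun c => (c.length + 2) ^ (n + 1 - (col + 1))),
      x ≤ (rows.length + 2) ^ (n + 1 - (col + 1)) := by
    intro x hx
    obtain ⟨c, hc, rfl⟩ := List.mem_map.mp hx
    exact Nat.pow_le_pow_left (by have := hb.2 c hc; omega) _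
  have hsum := List.sum_le_card_nsmul _ _ hbound
  simp only [List.length_map, smul_eq_mul] at hsum
  have hlen : (childrenB A col rows).1.length * (rows.length + 2) ^ (n + 1 - (col + 1))
      ≤ (rows.length + 1) * (rows.length + 2) ^ (n + 1 - (col + 1)) :=
    Nat.mul_le_mul_right _ hb.1
  have hstep : (rows.length + 1) * (rows.length + 2) ^ (n + 1 - (col + 1))
      < (rows.length + 2) ^ (n + 1 - col) := by
    have he : n + 1 - col = (n + 1 - (col + 1)) + 1 := by omega
    rw [he, pow_succ]
    have hpos : 0 < (rows.length + 2) ^ (n + 1 - (col + 1)) := pow_pos (by omega) _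
    calc (rows.length + 1) * (rows.length + 2) ^ (n + 1 - (col + 1))
        = (rows.length + 2) ^ (n + 1 - (col + 1)) * (rows.length + 1) := by ring
      _ < (rows.length + 2) ^ (n + 1 - (col + 1)) * (rows.length + 2) :=
          mul_lt_mul_of_pos_left (by omega) hpos
  omega

-- the 'while stack' loop; head of the list = top of the stack
def runB (A : List String) (n : Nat) (stack : List (List Int × Nat)) (res : PySem.Set Nat) :
    PySem.Set Nat :=
  match stack with
  | [] => res
  | (rows, col) :: st =>
    if n ≤ col then runB A n st res
    else if col ∈ res then runB A n ((rows, col + 1) :: st) res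
    else
      let cb := childrenB A col rows
      let res' := if cb.2 then res.add col else res
      runB A n (cb.1.map (fun c => (c, col + 1)) ++ st) res'
termination_by (stack.map (fun fr => (fr.1.length + 2) ^ (n + 1 - fr.2))).sum
decreasing_by
  · have : 0 < (rows.length + 2) ^ (n + 1 - col) := pow_pos (by omega) _
    simp only [List.map_cons, List.sum_cons]; omega
  · simp only [List.map_cons, List.sum_cons]
    have : (rows.length + 2) ^ (n + 1 - (col + 1)) < (rows.length + 2) ^ (n + 1 - col) :=
      Nat.pow_lt_pow_right (by omega) (by omega)
    omega
  · simp only [List.map_append, List.sum_append, List.map_cons, List.sum_cons, List.map_map]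
    have := childrenB_pow_bound A col n rows (by omega)
    simp only [Function.comp_def] at this ⊢
    omega

def minDeletionSize_alt (A : List String) : Int :=
  let n := (PySem.Str.len ((PySem.List.pyGet? A 0).getD "")).toNat
  PySem.Set.len (runB A n [(PySem.List.pyRange 0 (A.length) 1, 0)] PySem.Set.empty)

-- ===== PRECONDITION & SPEC =====
-- Pre_ excludes: the empty list (A[0] raises IndexError); inputs with a row shorter than the
-- first row, on which the Python may raise IndexError when that row is still grouped with
-- others at a column beyond its length; and inputs in which two rows carry the character '#'
-- in the same column, on which A's defaultdict sentinel key "#" can collide with a real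
-- tie-run of '#' characters, so that A's set of recursive calls is an accident of that
-- collision (both values are artefacts nobody would specify).
def Pre_minDeletionSize (A : List String) : Prop :=
  A ≠ [] ∧ (∀ s ∈ A, (A.headD "").toList.length ≤ s.toList.length) ∧
    A.Pairwise (fun s t => ∀ c < (A.headD "").toList.length,
      ¬(s.toList.getD c ' ' = '#' ∧ t.toList.getD c ' ' = '#'))
instance (A : List String) : Decidable (Pre_minDeletionSize A) := by
  unfold Pre_minDeletionSize; infer_instance

def pvWitness_minDeletionSize : List String := ["ba", "ab", "ab"]

def Spec_minDeletionSize (A : List String) (out : Int) : Prop := out = minDeletionSize_alt A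
instance (A : List String) (out : Int) : Decidable (Spec_minDeletionSize A out) := by
  unfold Spec_minDeletionSize; infer_instance

-- ===== CLAIM (what is proved, stated in full; the proofs are below) =====
def Claim_equal_minDeletionSize : Prop :=
  ∀ (A : List String), Dom_minDeletionSize A → Pre_minDeletionSize A →
    Spec_minDeletionSize A (minDeletionSize A)

-- ===== LEMMAS AND PROOFS =====

-- the exact insertion order of a tie-group set built by goA: second row first, then the rest
def swapHead : List Int → List Int
  | a :: b :: t => b :: a :: t
  | l => l

def entryF (A : List String) (col : Nat) (run : List Int) : Char × PySem.Set Int :=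
  (chAt A (run.headD 0) col, swapHead run)

theorem goK_shift (A : List String) (col : Nat) :
    ∀ (rest : List Int) (prev : Int) (i : Nat),
      goK A col (i + 1) prev rest = (goK A col 1 prev rest).map (· + i) := by
  intro rest
  induction rest with
  | nil => intro prev i; simp [goK]
  | cons r rest' ih =>
    intro prev i
    by_cases h : chAt A r col < chAt A prev col
    · simp [goK, h]; omega
    · simp only [goK, if_neg h]
      rw [ih r (i + 1), ih r 1]
      cases goK A col 1 r rest' <;> simp <;> omega

theorem goK_pos (A : List String) (col : Nat) :
    ∀ (rest : List Int) (prev : Int) (i j : Nat), goK A col i prev rest = some j → i ≤ j := by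
  intro rest
  induction rest with
  | nil => intro prev i j h; simp [goK] at h
  | cons r rest' ih =>
    intro prev i j h
    rw [goK] at h
    split at h
    · simp at h; omega
    · have := ih r (i + 1) j h; omega

theorem runsB_sublist (A : List String) (col : Nat) (l : List Int) :
    ∀ run ∈ runsB A col l, run.Sublist l := by
  fun_induction runsB A col l with
  | case1 => simp [runsB]
  | case2 x xs ih =>
    intro run hrun
    rcases List.mem_cons.mp hrun with h | h
    · subst h
      exact List.Sublist.cons₂ x (List.takeWhile_sublist _)
    · exact ((ih run h).trans (List.dropWhile_sublist _)).cons x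

-- every element of a run has the run head's character
theorem runsB_all_eq (A : List String) (col : Nat) (l : List Int) :
    ∀ run ∈ runsB A col l, ∀ y ∈ run, chAt A y col = chAt A (run.headD 0) col := by
  fun_induction runsB A col l with
  | case1 => simp
  | case2 x xs ih =>
    intro run hrun y hy
    rcases List.mem_cons.mp hrun with h | h
    · subst h
      simp only [List.headD_cons]
      rcases List.mem_cons.mp hy with rfl | h'
      · rfl
      · simpa using List.mem_takeWhile_imp h'
    · exact ih run h y hy

theorem find?_init_none (init : List (Char × PySem.Set Int)) (c : Char)
    (hinit : ∀ kv ∈ init, kv.1 < c) : init.find? (fun p => p.1 == c) = none := by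
  apply List.find?_eq_none.mpr
  intro kv hkv
  simpa using (ne_of_lt (hinit kv hkv))

theorem any_init_false (init : List (Char × PySem.Set Int)) (c : Char)
    (hinit : ∀ kv ∈ init, kv.1 < c) : (init.any (fun p => p.1 == c)) = false := by
  simp only [List.any_eq_false]
  intro kv hkv
  simpa using (ne_of_lt (hinit kv hkv))

theorem map_replace_init (init : List (Char × PySem.Set Int)) (c : Char) (v : PySem.Set Int)
    (hinit : ∀ kv ∈ init, kv.1 < c) :
    init.map (fun p => if p.1 == c then (c, v) else p) = init := by
  conv_rhs => rw [← List.map_id init]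
  apply List.map_congr_left
  intro kv hkv
  have hne := ne_of_lt (hinit kv hkv)
  simp [hne]

-- the run containing y inside the prefix before the first break is the whole run of y
theorem takeWhile_take_goK (A : List String) (col : Nat) :
    ∀ (ys : List Int) (y : Int),
      ((ys.take (((goK A col 1 y ys).getD (ys.length + 1)) - 1)).takeWhile
          (fun z => decide (chAt A z col = chAt A y col)))
        = ys.takeWhile (fun z => decide (chAt A z col = chAt A y col)) := by
  intro ys
  induction ys with
  | nil => intro y; simp
  | cons z zs ih =>
    intro y
    by_cases h : chAt A z col < chAt A y col
    · have hne : ¬ (chAt A z col = chAt A y col) := ne_of_lt h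
      simp [goK, h, hne]
    · rw [goK]
      simp only [if_neg h]
      rw [goK_shift A col zs z 1]
      by_cases he : chAt A z col = chAt A y col
      · have hpred : (fun w => decide (chAt A w col = chAt A y col))
            = (fun w => decide (chAt A w col = chAt A z col)) := by
          funext w; rw [he]
        cases hk : goK A col 1 z zs with
        | none =>
          simp only [hk, Option.map_none, Option.getD_none, List.length_cons]
          rw [List.take_of_length_le (by simp)]
        | some j =>
          obtain ⟨j', rfl⟩ : ∃ j', j = j' + 1 :=
            ⟨j - 1, by have := goK_pos A col zs z 1 j hk; omega⟩
          simp only [hk, Option.map_some, Option.getD_some]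
          have h15 : j' + 1 + 1 - 1 = j' + 1 := by omega
          rw [h15, List.take_succ_cons, hpred]
          have h2 := ih z
          rw [hk] at h2
          simp only [Option.getD_some, Nat.add_sub_cancel] at h2
          simp [h2]
      · cases hk : goK A col 1 z zs with
        | none =>
          simp only [hk, Option.map_none, Option.getD_none, List.length_cons]
          rw [List.take_of_length_le (by simp)]
        | some j =>
          obtain ⟨j', rfl⟩ : ∃ j', j = j' + 1 :=
            ⟨j - 1, by have := goK_pos A col zs z 1 j hk; omega⟩
          simp only [hk, Option.map_some, Option.getD_some]
          have h15 : j' + 1 + 1 - 1 = j' + 1 := by omega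
          rw [h15, List.take_succ_cons]
          simp [he]

theorem dict_getD_none (d : PySem.Dict Char (PySem.Set Int)) (c : Char)
    (h : d.items.find? (fun p => p.1 == c) = none) :
    d.getD c PySem.Set.empty = PySem.Set.empty := by
  simp [PySem.Dict.getD, PySem.Dict.get?, h]

theorem dict_getD_some (d : PySem.Dict Char (PySem.Set Int)) (c : Char) (p : Char × PySem.Set Int)
    (h : d.items.find? (fun q => q.1 == c) = some p) :
    d.getD c PySem.Set.empty = p.2 := by
  simp [PySem.Dict.getD, PySem.Dict.get?, h]

theorem dict_insert_not_contains (d : PySem.Dict Char (PySem.Set Int)) (c : Char)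
    (v : PySem.Set Int) (h : d.items.any (fun p => p.1 == c) = false) :
    (d.insert c v).items = d.items ++ [(c, v)] := by
  simp [PySem.Dict.insert, PySem.Dict.contains, h]

theorem dict_insert_contains (d : PySem.Dict Char (PySem.Set Int)) (c : Char)
    (v : PySem.Set Int) (h : d.items.any (fun p => p.1 == c) = true) :
    (d.insert c v).items = d.items.map (fun p => if p.1 == c then (c, v) else p) := by
  simp [PySem.Dict.insert, PySem.Dict.contains, h]

-- the big scan lemma: what goA computes, for any partially-built todos
theorem goA_run (A : List String) (col : Nat) (rows : List Int) (res : PySem.Set Nat)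
    (hrows : rows.Pairwise (· < ·)) :
    ∀ (xs : List Int) (x : Int) (P : List Int)
      (hl : rows = P ++ x :: xs)
      (init : List (Char × PySem.Set Int)) (mid : Option (PySem.Set Int))
      (todos : PySem.Dict Char (PySem.Set Int))
      (hitems : todos.items = init ++ (mid.map (fun S => (chAt A x col, S))).toList)
      (hinit : ∀ kv ∈ init, kv.1 < chAt A x col)
      (hmid : ∀ S, mid = some S → x ∈ S ∧ S.Nodup ∧ ∀ e ∈ S, e ∈ P ++ [x]),
      goA A rows col x xs todos res =
        (let k := (goK A col 1 x xs).getD (xs.length + 1)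
         let pre := (x :: xs).take k
         let entries := init ++
           (match mid with
            | none => ((runsB A col pre).filter (fun r => 2 ≤ r.length)).map (entryF A col)
            | some S => (chAt A x col,
                  S ++ xs.takeWhile (fun y => chAt A y col = chAt A x col)) ::
                (((runsB A col pre).drop 1).filter (fun r => 2 ≤ r.length)).map (entryF A col))
         if k < xs.length + 1 then
           ((PySem.Dict.mk entries).insert '#'
              (((PySem.Dict.mk entries).getD '#' PySem.Set.empty).update rows),
            res.add col, true)
         else ((PySem.Dict.mk entries), res, false)) := by
  intro xs
  induction xs with
  | nil =>
    intro x P hl init mid todos hitems hinit hmid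
    rw [goA]
    simp only [goK, Option.getD_none, List.length_nil]
    rw [if_neg (by omega)]
    have hruns : runsB A col ((x :: ([] : List Int)).take 1) = [[x]] := by
      rw [List.take_succ_cons, List.take_nil, runsB]
      simp [runsB]
    simp only [hruns]
    cases mid with
    | none =>
      simp only [Option.map_none, Option.toList_none, List.append_nil] at hitems
      have hflt : (([[x]] : List (List Int)).filter (fun r => 2 ≤ r.length)) = [] := by
        simp [List.filter]
      simp only [hflt, List.map_nil, List.append_nil]
      have hd : PySem.Dict.mk init = todos := PySem.Dict.ext (by rw [hitems])
      rw [hd]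
    | some S =>
      simp only [Option.map_some, Option.toList_some] at hitems
      simp only [List.takeWhile_nil, List.append_nil, List.drop_succ_cons, List.drop_nil,
        List.filter_nil, List.map_nil]
      have hd : PySem.Dict.mk (init ++ [(chAt A x col, S)]) = todos :=
        PySem.Dict.ext (by rw [hitems])
      rw [hd]
  | cons y ys ih =>
    intro x P hl init mid todos hitems hinit hmid
    have hxy : x < y := by
      have h1 : [x, y].Sublist (x :: y :: ys) :=
        List.cons_sublist_cons.mpr (List.cons_sublist_cons.mpr (List.nil_sublist ys))
      have h2 : (x :: y :: ys).Sublist rows := hl ▸ List.sublist_append_right P _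
      have hp := hrows.sublist (h1.trans h2)
      exact (List.pairwise_cons.mp hp).1 y (by simp)
    have hynP : y ∉ P ++ [x] := by
      have hnd : rows.Nodup := hrows.imp (fun h => ne_of_lt h)
      have hre : (P ++ [x]) ++ y :: ys = rows := by rw [hl]; simp
      rw [← hre] at hnd
      intro hyP
      exact List.disjoint_of_nodup_append hnd hyP (by simp)
    have hk1 : 1 ≤ (goK A col 1 y ys).getD (ys.length + 1) := by
      cases hkk : goK A col 1 y ys with
      | none => simp
      | some j => have := goK_pos A col ys y 1 j hkk; simpa using this
    rw [goA]
    simp only []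
    by_cases hlt : chAt A y col < chAt A x col
    · -- break at the very first pair
      rw [if_pos hlt]
      have hgk : goK A col 1 x (y :: ys) = some 1 := by rw [goK, if_pos hlt]
      simp only [hgk, Option.getD_some, List.length_cons]
      rw [if_pos (by omega)]
      have hruns : runsB A col ((x :: y :: ys).take 1) = [[x]] := by
        rw [List.take_succ_cons, List.take_zero, runsB]
        simp [runsB]
      simp only [hruns]
      have hne : ¬ (chAt A y col = chAt A x col) := ne_of_lt hlt
      cases mid with
      | none =>
        simp only [Option.map_none, Option.toList_none, List.append_nil] at hitems
        have hflt : (([[x]] : List (List Int)).filter (fun r => 2 ≤ r.length)) = [] := by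
          simp [List.filter]
        simp only [hflt, List.map_nil, List.append_nil]
        have hd : PySem.Dict.mk init = todos := PySem.Dict.ext (by rw [hitems])
        rw [hd]
      | some S =>
        simp only [Option.map_some, Option.toList_some] at hitems
        have hd : PySem.Dict.mk (init ++ [(chAt A x col, S)]) = todos :=
          PySem.Dict.ext (by rw [hitems])
        simp only [List.takeWhile_cons]
        simp [hne]
        rw [hd]
    · rw [if_neg hlt]
      have hksh : goK A col 1 x (y :: ys) = (goK A col 1 y ys).map (· + 1) := by
        rw [goK, if_neg hlt]
        exact goK_shift A col ys y 1
      have hl' : rows = (P ++ [x]) ++ y :: ys := by rw [hl]; simp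
      by_cases heq : chAt A y col = chAt A x col
      · -- tie: the current run continues with y
        rw [if_pos heq]
        have hinit' : ∀ kv ∈ init, kv.1 < chAt A y col := by
          intro kv hkv; rw [heq]; exact hinit kv hkv
        have hpred : (fun z => decide (chAt A z col = chAt A y col))
            = (fun z => decide (chAt A z col = chAt A x col)) := by
          funext z; rw [heq]
        cases mid with
        | none =>
          simp only [Option.map_none, Option.toList_none, List.append_nil] at hitems
          have hfind0 : todos.items.find? (fun p => p.1 == chAt A y col) = none := by
            rw [hitems]; exact find?_init_none init _ hinit'
          have hg0 : todos.getD (chAt A y col) PySem.Set.empty = PySem.Set.empty :=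
            dict_getD_none _ _ hfind0
          have hany0 : todos.items.any (fun p => p.1 == chAt A y col) = false := by
            rw [hitems]; exact any_init_false init _ hinit'
          have hadd0 : PySem.Set.empty.add y = [y] := rfl
          have hi1 : (todos.insert (chAt A y col) [y]).items
              = init ++ [(chAt A y col, [y])] := by
            rw [dict_insert_not_contains _ _ _ hany0, hitems]
          have hfind1 : (init ++ [(chAt A y col, ([y] : PySem.Set Int))]).find?
              (fun p => p.1 == chAt A y col) = some (chAt A y col, [y]) := by
            rw [List.find?_append, find?_init_none init _ hinit']
            simp
          have hg1 : (todos.insert (chAt A y col) [y]).getD (chAt A y col) PySem.Set.empty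
              = [y] := by
            have := dict_getD_some (todos.insert (chAt A y col) [y]) (chAt A y col)
              (chAt A y col, [y]) (by rw [hi1]; exact hfind1)
            simpa using this
          have hadd1 : PySem.Set.add ([y] : PySem.Set Int) x = [y, x] := by
            rw [PySem.Set.add_of_not_mem (by simp; omega)]; rfl
          have hany1 : (todos.insert (chAt A y col) [y]).items.any
              (fun p => p.1 == chAt A y col) = true := by
            rw [hi1]; simp
          have hi2 : ((todos.insert (chAt A y col) [y]).insert (chAt A y col) [y, x]).items
              = init ++ [(chAt A y col, [y, x])] := by
            rw [dict_insert_contains _ _ _ hany1, hi1, List.map_append,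
              map_replace_init init _ _ hinit']
            simp
          have htd2 : (todos.insert (chAt A y col)
                ((todos.getD (chAt A y col) PySem.Set.empty).add y)).insert (chAt A y col)
                ((((todos.insert (chAt A y col) ((todos.getD (chAt A y col)
                  PySem.Set.empty).add y))).getD (chAt A y col) PySem.Set.empty).add x)
              = PySem.Dict.mk (init ++ [(chAt A y col, [y, x])]) := by
            rw [hg0, hadd0, hg1, hadd1]
            exact PySem.Dict.ext (by rw [hi2])
          rw [htd2]
          rw [ih y (P ++ [x]) hl' init (some [y, x]) _ (by simp) hinit'
            (by intro S hS; cases hS; exact ⟨by simp, by simp [List.Nodup]; omega,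
              by intro e he; simp at he; rcases he with rfl | rfl <;> simp⟩)]
          simp only [hksh]
          cases hkk : goK A col 1 y ys with
          | none =>
            simp only [hkk, Option.map_none, Option.getD_none, List.length_cons]
            rw [if_neg (by omega), if_neg (by omega)]
            have hent : init ++ (chAt A y col,
                  ([y, x] : PySem.Set Int) ++ ys.takeWhile (fun z => decide (chAt A z col = chAt A y col))) ::
                  (((runsB A col ((y :: ys).take (ys.length + 1))).drop 1).filter
                    (fun r => 2 ≤ r.length)).map (entryF A col)
                = init ++ ((runsB A col ((x :: y :: ys).take (ys.length + 1 + 1))).filter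
                    (fun r => 2 ≤ r.length)).map (entryF A col) := by
              rw [List.take_of_length_le (by simp), List.take_of_length_le (by simp)]
              conv_lhs => rw [runsB]
              conv_rhs => rw [runsB]
              rw [hpred]
              simp [entryF, swapHead, heq]
            rw [hent]
          | some j =>
            obtain ⟨j', rfl⟩ : ∃ j', j = j' + 1 :=
              ⟨j - 1, by have := goK_pos A col ys y 1 j hkk; omega⟩
            simp only [hkk, Option.map_some, Option.getD_some, List.length_cons]
            have htw := takeWhile_take_goK A col ys y
            rw [hkk] at htw
            simp only [Option.getD_some, Nat.add_sub_cancel] at htw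
            have hent : init ++ (chAt A y col,
                  ([y, x] : PySem.Set Int) ++ ys.takeWhile (fun z => decide (chAt A z col = chAt A y col))) ::
                  (((runsB A col ((y :: ys).take (j' + 1))).drop 1).filter
                    (fun r => 2 ≤ r.length)).map (entryF A col)
                = init ++ ((runsB A col ((x :: y :: ys).take (j' + 1 + 1))).filter
                    (fun r => 2 ≤ r.length)).map (entryF A col) := by
              simp only [List.take_succ_cons]
              conv_lhs => rw [runsB]
              conv_rhs => rw [runsB]
              rw [hpred] at htw ⊢
              simp [entryF, swapHead, heq, htw]
            by_cases hbrk : j' + 1 < ys.length + 1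
            · rw [if_pos (by omega), if_pos (by omega), hent]
            · rw [if_neg (by omega), if_neg (by omega), hent]
        | some S =>
          simp only [Option.map_some, Option.toList_some] at hitems
          obtain ⟨hxS, hSnd, hSsub⟩ := hmid S rfl
          have hynS : y ∉ S := fun hy => hynP (hSsub y hy)
          have hfind0 : todos.items.find? (fun p => p.1 == chAt A y col)
              = some (chAt A x col, S) := by
            rw [hitems, List.find?_append, find?_init_none init _ hinit']
            simp [heq]
          have hg0 : todos.getD (chAt A y col) PySem.Set.empty = S :=
            dict_getD_some _ _ _ hfind0
          have hadd0 : S.add y = S ++ [y] := PySem.Set.add_of_not_mem hynS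
          have hany0 : todos.items.any (fun p => p.1 == chAt A y col) = true := by
            rw [hitems]; simp [heq]
          have hi1 : (todos.insert (chAt A y col) (S ++ [y])).items
              = init ++ [(chAt A y col, S ++ [y])] := by
            rw [dict_insert_contains _ _ _ hany0, hitems, List.map_append,
              map_replace_init init _ _ hinit']
            simp [heq]
          have hfind1 : (init ++ [(chAt A y col, S ++ [y])]).find?
              (fun p => p.1 == chAt A y col) = some (chAt A y col, S ++ [y]) := by
            rw [List.find?_append, find?_init_none init _ hinit']
            simp
          have hg1 : (todos.insert (chAt A y col) (S ++ [y])).getD (chAt A y col)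
              PySem.Set.empty = S ++ [y] := by
            have := dict_getD_some (todos.insert (chAt A y col) (S ++ [y])) (chAt A y col)
              (chAt A y col, S ++ [y]) (by rw [hi1]; exact hfind1)
            simpa using this
          have hadd1 : PySem.Set.add (S ++ [y] : PySem.Set Int) x = S ++ [y] :=
            PySem.Set.add_of_mem (by simp [hxS])
          have hany1 : (todos.insert (chAt A y col) (S ++ [y])).items.any
              (fun p => p.1 == chAt A y col) = true := by
            rw [hi1]; simp
          have hi2 : ((todos.insert (chAt A y col) (S ++ [y])).insert (chAt A y col)
                (S ++ [y])).items = init ++ [(chAt A y col, S ++ [y])] := by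
            rw [dict_insert_contains _ _ _ hany1, hi1, List.map_append,
              map_replace_init init _ _ hinit']
            simp
          have htd2 : (todos.insert (chAt A y col)
                ((todos.getD (chAt A y col) PySem.Set.empty).add y)).insert (chAt A y col)
                ((((todos.insert (chAt A y col) ((todos.getD (chAt A y col)
                  PySem.Set.empty).add y))).getD (chAt A y col) PySem.Set.empty).add x)
              = PySem.Dict.mk (init ++ [(chAt A y col, S ++ [y])]) := by
            rw [hg0, hadd0, hg1, hadd1]
            exact PySem.Dict.ext (by rw [hi2])
          rw [htd2]
          rw [ih y (P ++ [x]) hl' init (some (S ++ [y])) _ (by simp) hinit'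
            (by intro T hT; cases hT; refine ⟨by simp, ?_, ?_⟩
                · simp only [List.nodup_append]
                  refine ⟨hSnd, List.nodup_singleton y, ?_⟩
                  intro a ha b hb hab
                  have hb' : b = y := by simpa using hb
                  exact hynS ((hab.trans hb') ▸ ha)
                · intro e he
                  rcases List.mem_append.mp he with h | h
                  · have := hSsub e h; simp at this ⊢; tauto
                  · simp at h; simp [h])]
          simp only [hksh]
          cases hkk : goK A col 1 y ys with
          | none =>
            simp only [hkk, Option.map_none, Option.getD_none, List.length_cons]
            rw [if_neg (by omega), if_neg (by omega)]
            have hent : init ++ (chAt A y col,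
                  (S ++ [y]) ++ ys.takeWhile (fun z => decide (chAt A z col = chAt A y col))) ::
                  (((runsB A col ((y :: ys).take (ys.length + 1))).drop 1).filter
                    (fun r => 2 ≤ r.length)).map (entryF A col)
                = init ++ (chAt A x col,
                    S ++ (y :: ys).takeWhile (fun z => decide (chAt A z col = chAt A x col))) ::
                  (((runsB A col ((x :: y :: ys).take (ys.length + 1 + 1))).drop 1).filter
                    (fun r => 2 ≤ r.length)).map (entryF A col) := by
              rw [List.take_of_length_le (by simp), List.take_of_length_le (by simp)]
              conv_lhs => rw [runsB]
              conv_rhs => rw [runsB]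
              rw [hpred]
              simp [heq]
            rw [hent]
          | some j =>
            obtain ⟨j', rfl⟩ : ∃ j', j = j' + 1 :=
              ⟨j - 1, by have := goK_pos A col ys y 1 j hkk; omega⟩
            simp only [hkk, Option.map_some, Option.getD_some, List.length_cons]
            have htw := takeWhile_take_goK A col ys y
            rw [hkk] at htw
            simp only [Option.getD_some, Nat.add_sub_cancel] at htw
            have hent : init ++ (chAt A y col,
                  (S ++ [y]) ++ ys.takeWhile (fun z => decide (chAt A z col = chAt A y col))) ::
                  (((runsB A col ((y :: ys).take (j' + 1))).drop 1).filter
                    (fun r => 2 ≤ r.length)).map (entryF A col)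
                = init ++ (chAt A x col,
                    S ++ (y :: ys).takeWhile (fun z => decide (chAt A z col = chAt A x col))) ::
                  (((runsB A col ((x :: y :: ys).take (j' + 1 + 1))).drop 1).filter
                    (fun r => 2 ≤ r.length)).map (entryF A col) := by
              simp only [List.take_succ_cons]
              conv_lhs => rw [runsB]
              conv_rhs => rw [runsB]
              rw [hpred] at htw ⊢
              simp [heq, htw]
            by_cases hbrk : j' + 1 < ys.length + 1
            · rw [if_pos (by omega), if_pos (by omega), hent]
            · rw [if_neg (by omega), if_neg (by omega), hent]
      · -- strictly increasing: the current run (if any) is closed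
        rw [if_neg heq]
        have hclt : chAt A x col < chAt A y col :=
          lt_of_le_of_ne (not_lt.mp hlt) (fun h => heq h.symm)
        have hpy : ¬ (chAt A y col = chAt A x col) := fun h => heq h
        cases mid with
        | none =>
          simp only [Option.map_none, Option.toList_none, List.append_nil] at hitems
          rw [ih y (P ++ [x]) hl' init none _ (by simpa using hitems)
            (fun kv hkv => lt_trans (hinit kv hkv) hclt) (by intro S hS; cases hS)]
          simp only [hksh]
          cases hkk : goK A col 1 y ys with
          | none =>
            simp only [hkk, Option.map_none, Option.getD_none, List.length_cons]
            rw [if_neg (by omega), if_neg (by omega)]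
            have hent : ((runsB A col ((y :: ys).take (ys.length + 1))).filter
                    (fun r => 2 ≤ r.length)).map (entryF A col)
                = ((runsB A col ((x :: y :: ys).take (ys.length + 1 + 1))).filter
                    (fun r => 2 ≤ r.length)).map (entryF A col) := by
              rw [List.take_of_length_le (by simp), List.take_of_length_le (by simp)]
              conv_rhs => rw [runsB]
              simp [hpy]
            rw [hent]
          | some j =>
            obtain ⟨j', rfl⟩ : ∃ j', j = j' + 1 :=
              ⟨j - 1, by have := goK_pos A col ys y 1 j hkk; omega⟩
            simp only [hkk, Option.map_some, Option.getD_some, List.length_cons]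
            have hent : ((runsB A col ((y :: ys).take (j' + 1))).filter
                    (fun r => 2 ≤ r.length)).map (entryF A col)
                = ((runsB A col ((x :: y :: ys).take (j' + 1 + 1))).filter
                    (fun r => 2 ≤ r.length)).map (entryF A col) := by
              simp only [List.take_succ_cons]
              conv_rhs => rw [runsB]
              simp [hpy]
            by_cases hbrk : j' + 1 < ys.length + 1
            · rw [if_pos (by omega), if_pos (by omega), hent]
            · rw [if_neg (by omega), if_neg (by omega), hent]
        | some S =>
          simp only [Option.map_some, Option.toList_some] at hitems
          rw [ih y (P ++ [x]) hl' (init ++ [(chAt A x col, S)]) none _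
            (by simpa using hitems)
            (by intro kv hkv
                rcases List.mem_append.mp hkv with h | h
                · exact lt_trans (hinit kv h) hclt
                · simp at h; subst h; simpa using hclt)
            (by intro T hT; cases hT)]
          simp only [hksh]
          cases hkk : goK A col 1 y ys with
          | none =>
            simp only [hkk, Option.map_none, Option.getD_none, List.length_cons]
            rw [if_neg (by omega), if_neg (by omega)]
            have hent : (init ++ [(chAt A x col, S)]) ++
                  ((runsB A col ((y :: ys).take (ys.length + 1))).filter
                    (fun r => 2 ≤ r.length)).map (entryF A col)
                = init ++ (chAt A x col,
                    S ++ (y :: ys).takeWhile (fun z => decide (chAt A z col = chAt A x col))) ::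
                  (((runsB A col ((x :: y :: ys).take (ys.length + 1 + 1))).drop 1).filter
                    (fun r => 2 ≤ r.length)).map (entryF A col) := by
              rw [List.take_of_length_le (by simp), List.take_of_length_le (by simp)]
              conv_rhs => rw [runsB]
              simp [hpy]
            rw [hent]
          | some j =>
            obtain ⟨j', rfl⟩ : ∃ j', j = j' + 1 :=
              ⟨j - 1, by have := goK_pos A col ys y 1 j hkk; omega⟩
            simp only [hkk, Option.map_some, Option.getD_some, List.length_cons]
            have hent : (init ++ [(chAt A x col, S)]) ++
                  ((runsB A col ((y :: ys).take (j' + 1))).filter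
                    (fun r => 2 ≤ r.length)).map (entryF A col)
                = init ++ (chAt A x col,
                    S ++ (y :: ys).takeWhile (fun z => decide (chAt A z col = chAt A x col))) ::
                  (((runsB A col ((x :: y :: ys).take (j' + 1 + 1))).drop 1).filter
                    (fun r => 2 ≤ r.length)).map (entryF A col) := by
              simp only [List.take_succ_cons]
              conv_rhs => rw [runsB]
              simp [hpy]
            by_cases hbrk : j' + 1 < ys.length + 1
            · rw [if_pos (by omega), if_pos (by omega), hent]
            · rw [if_neg (by omega), if_neg (by omega), hent]

theorem swapHead_perm (l : List Int) : (swapHead l).Perm l := by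
  match l with
  | [] => simp [swapHead]
  | [a] => simp [swapHead]
  | a :: b :: t => exact List.Perm.swap a b t

theorem sorted_run (run rows : List Int) (hsub : run.Sublist rows)
    (hrows : rows.Pairwise (· < ·)) :
    PySem.List.sorted (swapHead run) (fun x => x) = run :=
  PySem.List.sorted_eq_of_perm_of_pairwise_lt _ run _ (swapHead_perm run).symm
    (List.Pairwise.sublist hsub hrows)

theorem sorted_update (S : PySem.Set Int) (rows : List Int) (hS : S.Nodup)
    (hsub : ∀ e ∈ S, e ∈ rows) (hrows : rows.Pairwise (· < ·)) :
    PySem.List.sorted (S.update rows) (fun x => x) = rows := by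
  have hrnd : rows.Nodup := hrows.imp (fun h => ne_of_lt h)
  have hund : (S.update rows).Nodup := PySem.Set.nodup_update S rows hS
  have hperm : rows.Perm (S.update rows) := by
    rw [List.perm_ext_iff_of_nodup hrnd hund]
    intro a
    rw [PySem.Set.mem_update]
    constructor
    · exact Or.inr
    · rintro (h | h)
      · exact hsub a h
      · exact h
  exact PySem.List.sorted_eq_of_perm_of_pairwise_lt _ rows _ hperm hrows

-- a run of length ≥ 2 cannot consist of '#' characters on inputs satisfying Pre_
theorem no_hash_run (A : List String) (col : Nat) (rows : List Int) (run : List Int)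
    (hsub : run.Sublist rows) (h2 : 2 ≤ run.length)
    (heq : ∀ y ∈ run, chAt A y col = chAt A (run.headD 0) col)
    (hrows : rows.Pairwise (· < ·))
    (hnh : ∀ r1 r2 : Int, r1 ∈ rows → r2 ∈ rows → r1 ≠ r2 →
      chAt A r1 col = '#' → chAt A r2 col = '#' → False) :
    chAt A (run.headD 0) col ≠ '#' := by
  intro hc
  match run, hsub, h2, heq, hc with
  | a :: b :: t, hsub, _, heq, hc =>
    have hab : a < b :=
      (List.pairwise_cons.mp (List.Pairwise.sublist hsub hrows)).1 b (by simp)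
    have ha : chAt A a col = '#' := by simpa using hc
    have hb : chAt A b col = '#' := by
      have := heq b (by simp)
      simp only [List.headD_cons] at this
      rw [this, ha]
    exact hnh a b (hsub.subset (by simp)) (hsub.subset (by simp)) (by omega) ha hb

-- with no '#' key among the tie-group entries, the sentinel entry is appended at the END,
-- so the values (each sorted) are exactly the runs followed by rows
theorem hash_values (A : List String) (col : Nat) (rows : List Int) :
    ∀ (rs2 : List (List Int)),
      (∀ run ∈ rs2, PySem.List.sorted (swapHead run) (fun x => x) = run) →
      (∀ run ∈ rs2, chAt A (run.headD 0) col ≠ '#') →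
      (PySem.List.sorted (PySem.Set.update PySem.Set.empty rows) (fun x => x) = rows) →
      (((PySem.Dict.mk (rs2.map (entryF A col))).insert '#'
          (((PySem.Dict.mk (rs2.map (entryF A col))).getD '#' PySem.Set.empty).update
            rows)).values.map (fun v => PySem.List.sorted v (fun x => x)))
      = rs2 ++ [rows] := by
  intro rs2
  induction rs2 with
  | nil =>
    intro _ _ h0
    have h0' : (PySem.List.sorted (PySem.Set.update ([] : List Int) rows) (fun x => x))
        = rows := h0
    simp [PySem.Dict.insert, PySem.Dict.contains, PySem.Dict.getD, PySem.Dict.get?,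
      PySem.Dict.values, h0']
  | cons run rs' ih =>
    intro hsort hne h0
    have hbf : ((entryF A col run).1 == '#') = false := by
      show (chAt A (run.headD 0) col == '#') = false
      exact beq_eq_false_iff_ne.mpr (hne run (by simp))
    have hget2 : ((PySem.Dict.mk ((entryF A col run) :: rs'.map (entryF A col))).getD '#'
          PySem.Set.empty)
        = ((PySem.Dict.mk (rs'.map (entryF A col))).getD '#' PySem.Set.empty) := by
      simp only [PySem.Dict.getD, PySem.Dict.get?, PySem.Dict.items, List.find?_cons, hbf]
    have hins2 : ∀ v, ((PySem.Dict.mk ((entryF A col run) :: rs'.map (entryF A col))).insert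
          '#' v).items
        = (entryF A col run) :: ((PySem.Dict.mk (rs'.map (entryF A col))).insert '#' v).items := by
      intro v
      by_cases hcr : (PySem.Dict.mk (rs'.map (entryF A col))).items.any
          (fun p => p.1 == '#') = true
      · have hA : (PySem.Dict.mk ((entryF A col run) :: rs'.map (entryF A col))).items.any
            (fun p => p.1 == '#') = true := by
          simp only [PySem.Dict.items] at hcr ⊢
          simp only [List.any_cons, hbf, Bool.false_or]
          exact hcr
        rw [dict_insert_contains _ _ _ hA, dict_insert_contains _ _ _ hcr]
        simp only [PySem.Dict.items, List.map_cons, if_neg (by simp [hbf] :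
          ¬ ((entryF A col run).1 == '#') = true)]
      · have hA : (PySem.Dict.mk ((entryF A col run) :: rs'.map (entryF A col))).items.any
            (fun p => p.1 == '#') = false := by
          simp only [PySem.Dict.items] at hcr ⊢
          simp only [List.any_cons, hbf, Bool.false_or]
          simpa using hcr
        rw [dict_insert_not_contains _ _ _ hA,
          dict_insert_not_contains _ _ _ (by simpa using hcr)]
        simp
    simp only [List.map_cons]
    rw [hget2, PySem.Dict.values, hins2]
    simp only [List.map_cons]
    rw [← PySem.Dict.values]
    rw [ih (fun r hr => hsort r (by simp [hr])) (fun r hr => hne r (by simp [hr])) h0]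
    have hsr : PySem.List.sorted ((entryF A col run).2) (fun x => x) = run :=
      hsort run (by simp)
    rw [hsr]
    simp

-- consequence: the values of the scanned dict, each sorted, are exactly B's children
theorem scan_children (A : List String) (col : Nat) (r0 : Int) (rest : List Int)
    (res : PySem.Set Nat) (hrows : (r0 :: rest).Pairwise (· < ·))
    (hnh : ∀ r1 r2 : Int, r1 ∈ (r0 :: rest) → r2 ∈ (r0 :: rest) → r1 ≠ r2 →
      chAt A r1 col = '#' → chAt A r2 col = '#' → False) :
    ((goA A (r0 :: rest) col r0 rest PySem.Dict.empty res).1.values.map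
        (fun v => PySem.List.sorted v (fun x => x)) = (childrenB A col (r0 :: rest)).1)
    ∧ ((goA A (r0 :: rest) col r0 rest PySem.Dict.empty res).2.1
        = (if (childrenB A col (r0 :: rest)).2 then res.add col else res)) := by
  have hrun := goA_run A col (r0 :: rest) res hrows rest r0 [] (by simp) [] none
      PySem.Dict.empty (by simp [PySem.Dict.empty]) (by simp) (by simp)
  unfold childrenB
  simp only []
  have hfk : findK A col (r0 :: rest) = goK A col 1 r0 rest := rfl
  simp only [hfk]
  rw [foldCB_eval, hrun]
  simp only [List.nil_append, List.length_cons]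
  rw [show PySem.List.slice (r0 :: rest) none
      (some ((((goK A col 1 r0 rest).getD (rest.length + 1)) : Nat) : Int))
      = (r0 :: rest).take ((goK A col 1 r0 rest).getD (rest.length + 1)) from by
    rw [PySem.List.slice_to _ (by positivity)]; simp]
  by_cases hbrk : (goK A col 1 r0 rest).getD (rest.length + 1) < rest.length + 1
  all_goals
    have hpresub : (List.take ((goK A col 1 r0 rest).getD (rest.length + 1))
        (r0 :: rest)).Sublist (r0 :: rest) := List.take_sublist _ _
    have hrunsub : ∀ run ∈ (runsB A col (List.take ((goK A col 1 r0 rest).getD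
        (rest.length + 1)) (r0 :: rest))).filter (fun r => decide (2 ≤ r.length)),
        run.Sublist (r0 :: rest) := fun run h =>
      (runsB_sublist A col _ run (List.mem_of_mem_filter h)).trans hpresub
    have hsorts : ∀ run ∈ (runsB A col (List.take ((goK A col 1 r0 rest).getD
        (rest.length + 1)) (r0 :: rest))).filter (fun r => decide (2 ≤ r.length)),
        PySem.List.sorted (swapHead run) (fun x => x) = run :=
      fun run h => sorted_run run _ (hrunsub run h) hrows
    have h0 : PySem.List.sorted (PySem.Set.update PySem.Set.empty (r0 :: rest)) (fun x => x)
        = r0 :: rest :=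
      sorted_update _ _ (by simp [PySem.Set.empty]) (by intro e he; simp [PySem.Set.empty] at he)
        hrows
  · rw [if_pos hbrk]
    have hbrk' : (goK A col 1 r0 rest).getD (rest.length + 1) ≤ rest.length := by omega
    have hnes : ∀ run ∈ (runsB A col (List.take ((goK A col 1 r0 rest).getD
        (rest.length + 1)) (r0 :: rest))).filter (fun r => decide (2 ≤ r.length)),
        chAt A (run.headD 0) col ≠ '#' := by
      intro run h
      exact no_hash_run A col (r0 :: rest) run (hrunsub run h)
        (by simpa using (List.of_mem_filter h)) 
        (runsB_all_eq A col _ run (List.mem_of_mem_filter h)) hrows hnh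
    constructor
    · rw [hash_values A col (r0 :: rest) _ hsorts hnes h0]
      simp [hbrk']
    · simp [hbrk']
  · rw [if_neg hbrk]
    have hnb : ¬ (goK A col 1 r0 rest).getD (rest.length + 1) ≤ rest.length := by omega
    constructor
    · simp only [PySem.Dict.values, PySem.Dict.items, List.map_map]
      have hmap : ((runsB A col (List.take ((goK A col 1 r0 rest).getD (rest.length + 1))
          (r0 :: rest))).filter (fun r => decide (2 ≤ r.length))).map
            ((fun v => PySem.List.sorted v (fun x => x)) ∘ (fun p => p.2) ∘ entryF A col)
          = (runsB A col (List.take ((goK A col 1 r0 rest).getD (rest.length + 1))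
            (r0 :: rest))).filter (fun r => decide (2 ≤ r.length)) := by
        conv_rhs => rw [← List.map_id ((runsB A col (List.take ((goK A col 1 r0 rest).getD
          (rest.length + 1)) (r0 :: rest))).filter (fun r => decide (2 ≤ r.length)))]
        apply List.map_congr_left
        intro r hr
        simpa [entryF] using hsorts r hr
      rw [hmap]
      simp [hnb]
    · simp [hnb]

theorem loopA_fold (A : List String) (n : Nat) :
    ∀ (vs : List (PySem.Set Int)) (col : Nat) (res : PySem.Set Nat),
      loopA A n vs col res
        = (vs.map (fun v => PySem.List.sorted v (fun x => x))).foldl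
            (fun r c => helperA A n c (col + 1) r) res := by
  intro vs
  induction vs with
  | nil => intro col res; rw [loopA]; simp
  | cons v vs' ih => intro col res; rw [loopA, ih]; simp

-- every child group is again strictly increasing, and its elements come from rows
theorem childrenB_mem (A : List String) (col : Nat) (rows : List Int) :
    ∀ c ∈ (childrenB A col rows).1, c = rows ∨ c.Sublist rows := by
  unfold childrenB
  simp only []
  rw [foldCB_eval]
  generalize (findK A col rows).getD rows.length = k
  have hpre : PySem.List.slice rows none (some (k : Int)) = rows.take k := by
    rw [PySem.List.slice_to _ (by positivity)]; simp
  rw [hpre]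
  intro c hc
  have hmem : c = rows ∨ c ∈ (runsB A col (rows.take k)).filter
      (fun r => decide (2 ≤ r.length)) := by
    split at hc
    · rcases List.mem_append.mp hc with h | h
      · right; simpa using h
      · left; simpa using h
    · right; simpa using hc
  rcases hmem with rfl | hm
  · left; rfl
  · right
    exact (runsB_sublist A col _ c (List.mem_of_mem_filter hm)).trans (List.take_sublist _ _)

-- the stack machine simulates the recursion
theorem sim (A : List String) (n : Nat)
    (HH : ∀ (col : Nat), col < n → ∀ r1 r2 : Int, r1 ∈ PySem.List.pyRange 0 (A.length) 1 →
      r2 ∈ PySem.List.pyRange 0 (A.length) 1 → r1 ≠ r2 →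
      chAt A r1 col = '#' → chAt A r2 col = '#' → False) :
    ∀ (d col : Nat), n - col ≤ d →
      ∀ (rows : List Int) (st : List (List Int × Nat)) (res : PySem.Set Nat),
        rows.Pairwise (· < ·) → (∀ r ∈ rows, r ∈ PySem.List.pyRange 0 (A.length) 1) →
        runB A n ((rows, col) :: st) res = runB A n st (helperA A n rows col res) := by
  intro d
  induction d with
  | zero =>
    intro col hcol rows st res _ _
    have hn : n ≤ col := by omega
    rw [runB, helperA.eq_def]
    simp [hn]
  | succ d ihd =>
    intro col hcol rows st res hp hv
    by_cases hn : n ≤ col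
    · rw [runB, helperA.eq_def]
      simp [hn]
    · by_cases hres : col ∈ res
      · rw [runB, helperA.eq_def]
        simp only [if_neg hn, if_pos hres]
        exact ihd (col + 1) (by omega) rows st res hp hv
      · have hinner : ∀ (cs : List (List Int)),
            (∀ c ∈ cs, c.Pairwise (· < ·) ∧ ∀ r ∈ c, r ∈ PySem.List.pyRange 0 (A.length) 1) →
            ∀ (st' : List (List Int × Nat)) (r : PySem.Set Nat),
            runB A n (cs.map (fun c => (c, col + 1)) ++ st') r
              = runB A n st' (cs.foldl (fun r c => helperA A n c (col + 1) r) r) := by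
          intro cs
          induction cs with
          | nil => intro _ st' r; simp
          | cons c cs' ihc =>
            intro hall st' r
            simp only [List.map_cons, List.cons_append, List.foldl_cons]
            rw [ihd (col + 1) (by omega) c _ r (hall c (by simp)).1 (hall c (by simp)).2]
            exact ihc (fun c' hc' => hall c' (by simp [hc'])) st' _
        cases rows with
        | nil =>
          rw [runB, helperA.eq_def]
          simp only [if_neg hn, if_neg hres]
          have hcb : childrenB A col ([] : List Int) = ([], false) := by
            simp [childrenB, findK, runsB, PySem.List.slice]
          rw [hcb]
          simp
        | cons r0 rest =>
          rw [runB, helperA.eq_def]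
          simp only [if_neg hn, if_neg hres]
          rw [loopA_fold]
          obtain ⟨h1, h2⟩ := scan_children A col r0 rest res hp
            (fun r1 r2 m1 m2 hne c1 c2 => HH col (by omega) r1 r2 (hv r1 m1) (hv r2 m2) hne c1 c2)
          rw [h1, h2]
          refine hinner _ ?_ st _
          intro c hc
          rcases childrenB_mem A col (r0 :: rest) c hc with rfl | hs
          · exact ⟨hp, hv⟩
          · exact ⟨List.Pairwise.sublist hs hp, fun r hr => hv r (hs.subset hr)⟩

-- unfolding the character accessor on an in-range index
theorem chAt_eq (A : List String) (r : Int) (col : Nat) (h0 : 0 ≤ r)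
    (h1 : r.toNat < A.length) (h2 : col < (A.getD r.toNat "").toList.length) :
    chAt A r col = (A.getD r.toNat "").toList.getD col ' ' := by
  unfold chAt
  have hr : r = ((r.toNat : Nat) : Int) := by omega
  rw [hr]
  simp only [Int.toNat_natCast]
  rw [List.getD_eq_getElem _ _ h1] at h2 ⊢
  simp only [PySem.List.pyGet?_natCast, PySem.Str.pyGet?_natCast,
    List.getElem?_eq_getElem h1, Option.getD_some]
  rw [List.getElem?_eq_getElem h2, Option.getD_some, List.getD_eq_getElem _ _ h2]

-- len(A[0]) in both ports is the length of the head string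
theorem n_eq (A : List String) (hA : A ≠ []) :
    (PySem.Str.len ((PySem.List.pyGet? A 0).getD "")).toNat = (A.headD "").toList.length := by
  cases A with
  | nil => simp at hA
  | cons h t =>
    have h0 : PySem.List.pyGet? (h :: t) (0 : Int) = some h := by
      rw [show (0 : Int) = ((0 : Nat) : Int) from rfl, PySem.List.pyGet?_natCast]
      rfl
    rw [h0]
    simp [PySem.Str.len_eq]

-- Pre_'s pairwise-'#' clause gives the hypothesis HH of the simulation
theorem hh_of_pre (A : List String)
    (hlen : ∀ s ∈ A, (A.headD "").toList.length ≤ s.toList.length)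
    (hpw : A.Pairwise (fun s t => ∀ c < (A.headD "").toList.length,
      ¬(s.toList.getD c ' ' = '#' ∧ t.toList.getD c ' ' = '#')))
    (col : Nat) (hcol : col < (A.headD "").toList.length) (r1 r2 : Int)
    (h1 : r1 ∈ PySem.List.pyRange 0 (A.length) 1)
    (h2 : r2 ∈ PySem.List.pyRange 0 (A.length) 1)
    (hne : r1 ≠ r2) (c1 : chAt A r1 col = '#') (c2 : chAt A r2 col = '#') : False := by
  rw [PySem.List.mem_pyRange_one] at h1 h2
  have hb1 : r1.toNat < A.length := by omega
  have hb2 : r2.toNat < A.length := by omega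
  have hl1 : col < (A.getD r1.toNat "").toList.length := by
    have := hlen (A.getD r1.toNat "") (by rw [List.getD_eq_getElem _ _ hb1]; exact List.getElem_mem _)
    omega
  have hl2 : col < (A.getD r2.toNat "").toList.length := by
    have := hlen (A.getD r2.toNat "") (by rw [List.getD_eq_getElem _ _ hb2]; exact List.getElem_mem _)
    omega
  rw [chAt_eq A r1 col (by omega) hb1 hl1] at c1
  rw [chAt_eq A r2 col (by omega) hb2 hl2] at c2
  have hij : r1.toNat ≠ r2.toNat := by omega
  have hR := List.pairwise_iff_getElem.mp hpw
  rcases Nat.lt_or_ge r1.toNat r2.toNat with hlt | hge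
  · have := hR r1.toNat r2.toNat hb1 hb2 hlt col hcol
    rw [List.getD_eq_getElem _ _ hb1] at c1
    rw [List.getD_eq_getElem _ _ hb2] at c2
    exact this ⟨c1, c2⟩
  · have hlt2 : r2.toNat < r1.toNat := by omega
    have := hR r2.toNat r1.toNat hb2 hb1 hlt2 col hcol
    rw [List.getD_eq_getElem _ _ hb1] at c1
    rw [List.getD_eq_getElem _ _ hb2] at c2
    exact this ⟨c2, c1⟩

-- ===== VERDICT (by name: the statement is the Claim_ definition above) =====
theorem minDeletionSize_spec : Claim_equal_minDeletionSize := by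
  intro A _ hpre
  obtain ⟨hA, hlen, hpw⟩ := hpre
  unfold Spec_minDeletionSize minDeletionSize minDeletionSize_alt
  simp only []
  have hn := n_eq A hA
  rw [sim A _ (fun col hcol => hh_of_pre A hlen hpw col (by omega)) ((PySem.Str.len
      ((PySem.List.pyGet? A 0).getD "")).toNat) 0 (by omega) _ [] _
    (by simpa using PySem.List.pairwise_lt_pyRange_one 0 (A.length)) (fun r hr => hr)]
  rw [runB]
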